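-- pv_equiv track=rewrite | github.com/soumoq/AWS-S3-with-Sagemaker | driver_behavior_model.py | calculate_behaviour
-- ===== SOURCE A (Python) =====
-- def calculate_behaviour(Driver_behaviour):
--     left_turn = 0
--     right_turn = 0
--     sudden_break = 0
--     sudden_acc = 0
--
--     for i in range(len(Driver_behaviour)):
--         if(Driver_behaviour[i] == "Sudden Left Turn"):
--             left_turn += 1
--         if(Driver_behaviour[i] == "Sudden Acceleration"):
--             sudden_acc += 1
--         if(Driver_behaviour[i] == "Sudden Break"):
--             sudden_break += 1
--         if(Driver_behaviour[i] == "Sudden Right Turn"):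
--             right_turn += 1
--
--     return left_turn,right_turn,sudden_break,sudden_acc
-- ===== SOURCE B (Python) =====
-- def calculate_behaviour(Driver_behaviour):
--     return (Driver_behaviour.count("Sudden Left Turn"),
--             Driver_behaviour.count("Sudden Right Turn"),
--             Driver_behaviour.count("Sudden Break"),
--             Driver_behaviour.count("Sudden Acceleration"))
-- ===== Notes on version B (the rewrite author's own statement) =====
-- stated objective: idiomatic
-- what changed: Replaces the single index-based accumulating loop over four counters with four independent list.count scans, one per category, returned in the same tuple order.
import Mathlib
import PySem

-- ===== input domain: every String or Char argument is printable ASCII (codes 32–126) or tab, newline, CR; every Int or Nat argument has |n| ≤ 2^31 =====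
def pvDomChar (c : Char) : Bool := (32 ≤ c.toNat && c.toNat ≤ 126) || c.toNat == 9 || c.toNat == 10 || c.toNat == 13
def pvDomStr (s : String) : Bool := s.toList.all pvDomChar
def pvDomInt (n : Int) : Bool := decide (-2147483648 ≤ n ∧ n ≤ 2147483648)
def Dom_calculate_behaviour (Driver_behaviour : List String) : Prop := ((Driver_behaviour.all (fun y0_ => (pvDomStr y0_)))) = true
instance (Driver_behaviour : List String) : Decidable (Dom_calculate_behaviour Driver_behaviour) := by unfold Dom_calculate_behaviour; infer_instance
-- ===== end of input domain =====

-- B replaces A's single accumulating index loop with four independent count scans (idiomatic, not faster).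
-- ===== PORT A =====
def calculate_behaviour (Driver_behaviour : List String) : Int × Int × Int × Int :=
  let res := (PySem.List.pyRange 0 (PySem.List.len Driver_behaviour) 1).foldl
    (fun (st : Int × Int × Int × Int) i =>
      let (left_turn, right_turn, sudden_break, sudden_acc) := st
      let x := PySem.List.pyGetD Driver_behaviour i ""
      let left_turn := if x == "Sudden Left Turn" then left_turn + 1 else left_turn
      let sudden_acc := if x == "Sudden Acceleration" then sudden_acc + 1 else sudden_acc
      let sudden_break := if x == "Sudden Break" then sudden_break + 1 else sudden_break
      let right_turn := if x == "Sudden Right Turn" then right_turn + 1 else right_turn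
      (left_turn, right_turn, sudden_break, sudden_acc))
    (0, 0, 0, 0)
  res

-- ===== PORT B =====
def calculate_behaviour_alt (Driver_behaviour : List String) : Int × Int × Int × Int :=
  ((PySem.List.count Driver_behaviour "Sudden Left Turn" : Int),
   (PySem.List.count Driver_behaviour "Sudden Right Turn" : Int),
   (PySem.List.count Driver_behaviour "Sudden Break" : Int),
   (PySem.List.count Driver_behaviour "Sudden Acceleration" : Int))

-- ===== PRECONDITION & SPEC =====
def Spec_calculate_behaviour (Driver_behaviour : List String) (out : Int × Int × Int × Int) : Prop := out = calculate_behaviour_alt Driver_behaviour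
instance (Driver_behaviour : List String) (out : Int × Int × Int × Int) : Decidable (Spec_calculate_behaviour Driver_behaviour out) := by unfold Spec_calculate_behaviour; infer_instance

-- ===== CLAIM (what is proved, stated in full; the proofs are below) =====
def Claim_equal_calculate_behaviour : Prop := ∀ (Driver_behaviour : List String), Dom_calculate_behaviour Driver_behaviour → Spec_calculate_behaviour Driver_behaviour (calculate_behaviour Driver_behaviour)

-- ===== LEMMAS AND PROOFS =====

-- ===== VERDICT (by name: the statement is the Claim_ definition above) =====
lemma foldl_counts (xs : List String) (l r b a : Int) :
    xs.foldl
      (fun (st : Int × Int × Int × Int) x =>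
        let (left_turn, right_turn, sudden_break, sudden_acc) := st
        let left_turn := if x == "Sudden Left Turn" then left_turn + 1 else left_turn
        let sudden_acc := if x == "Sudden Acceleration" then sudden_acc + 1 else sudden_acc
        let sudden_break := if x == "Sudden Break" then sudden_break + 1 else sudden_break
        let right_turn := if x == "Sudden Right Turn" then right_turn + 1 else right_turn
        (left_turn, right_turn, sudden_break, sudden_acc))
      (l, r, b, a)
    = (l + (xs.count "Sudden Left Turn" : Int),
       r + (xs.count "Sudden Right Turn" : Int),
       b + (xs.count "Sudden Break" : Int),
       a + (xs.count "Sudden Acceleration" : Int)) := by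
  induction xs generalizing l r b a with
  | nil => simp
  | cons h t ih =>
    simp only [List.foldl_cons, List.count_cons, ih]
    by_cases h1 : h = "Sudden Left Turn" <;> by_cases h2 : h = "Sudden Right Turn" <;>
      by_cases h3 : h = "Sudden Break" <;> by_cases h4 : h = "Sudden Acceleration" <;>
      simp_all <;> omega

theorem calculate_behaviour_spec : Claim_equal_calculate_behaviour := by
  intro xs _
  unfold Spec_calculate_behaviour calculate_behaviour calculate_behaviour_alt
  rw [PySem.List.foldl_pyRange_zero_pyGetD xs ""
    (fun (st : Int × Int × Int × Int) x =>
      let (left_turn, right_turn, sudden_break, sudden_acc) := st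
      let left_turn := if x == "Sudden Left Turn" then left_turn + 1 else left_turn
      let sudden_acc := if x == "Sudden Acceleration" then sudden_acc + 1 else sudden_acc
      let sudden_break := if x == "Sudden Break" then sudden_break + 1 else sudden_break
      let right_turn := if x == "Sudden Right Turn" then right_turn + 1 else right_turn
      (left_turn, right_turn, sudden_break, sudden_acc)) (0, 0, 0, 0)]
  rw [foldl_counts]
  simp [PySem.List.count]
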